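-- pv_equiv track=rewrite | github.com/novostavsky/PythonData101 | task1.py | get_max_downloader_per_day
-- ===== SOURCE A (Python) =====
-- def get_max_downloader_per_day(dayip_size_dictionary):
--     day_ip_dictionary = {}
--     day_size_dictionary = {}
--     for rec in dayip_size_dictionary:
--         date = rec.split(" - ")[0]
--         ip = rec.split(" - ")[1]
--         if date in day_size_dictionary:
--             if day_size_dictionary[date] < dayip_size_dictionary[rec]:
--                 day_size_dictionary[date] = dayip_size_dictionary[rec]
--                 day_ip_dictionary[date] = ip
--         else:
--             day_size_dictionary[date] = dayip_size_dictionary[rec]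
--             day_ip_dictionary[date] = ip
--
--     return day_ip_dictionary
-- ===== SOURCE B (Python) =====
-- def get_max_downloader_per_day(dayip_size_dictionary):
--     # group records by date, then pick the first maximal (ip, size) per group
--     groups = {}
--     for rec, size in dayip_size_dictionary.items():
--         parts = rec.split(" - ")
--         date = parts[0]
--         ip = parts[1]
--         groups[date] = groups.get(date, []) + [(ip, size)]
--     return {date: max(group, key=lambda t: t[1])[0]
--             for date, group in groups.items()}
-- ===== Notes on version B (the rewrite author's own statement) =====
-- stated objective: alternative
-- what changed: A keeps two running dicts (best size and best ip per date) updated in one pass; B first groups the records by date into lists of (ip, size) pairs and then takes the first maximal element of each group with max(key=size), matching A's strict-< first-seen tie-break.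
import Mathlib
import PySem

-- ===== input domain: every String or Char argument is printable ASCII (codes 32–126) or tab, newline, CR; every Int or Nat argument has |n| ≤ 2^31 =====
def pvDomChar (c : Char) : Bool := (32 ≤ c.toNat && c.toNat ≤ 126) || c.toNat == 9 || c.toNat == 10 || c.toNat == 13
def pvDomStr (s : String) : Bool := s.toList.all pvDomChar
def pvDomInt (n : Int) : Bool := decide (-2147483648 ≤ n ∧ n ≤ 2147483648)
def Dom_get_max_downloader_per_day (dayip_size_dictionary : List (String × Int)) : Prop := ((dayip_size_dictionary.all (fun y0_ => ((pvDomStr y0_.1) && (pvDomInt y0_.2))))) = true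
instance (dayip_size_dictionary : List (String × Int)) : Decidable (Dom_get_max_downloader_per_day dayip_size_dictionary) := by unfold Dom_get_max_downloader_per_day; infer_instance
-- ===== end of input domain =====

-- B replaces A's one-pass pair of running best-size/best-ip dicts by a group-by-date pass
-- followed by a first-maximal pick per group (same cost; a different decomposition).

-- ===== PORT A =====
def get_max_downloader_per_day (dayip_size_dictionary : List (String × Int)) : List (String × String) :=
  (dayip_size_dictionary.foldl
    (fun (st : PySem.Dict String String × PySem.Dict String Int) rec =>
      let date := (PySem.List.pyGet? (((PySem.Str.split? rec.1 " - ").getD [])) 0).getD ""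
      let ip := (PySem.List.pyGet? (((PySem.Str.split? rec.1 " - ").getD [])) 1).getD ""
      let size := ((PySem.Dict.mk dayip_size_dictionary).get? rec.1).getD 0
      if st.2.contains date then
        if st.2.getD date 0 < size then
          (st.1.insert date ip, st.2.insert date size)
        else st
      else (st.1.insert date ip, st.2.insert date size))
    (PySem.Dict.empty, PySem.Dict.empty)).1.items

-- ===== PORT B =====
def get_max_downloader_per_day_alt (dayip_size_dictionary : List (String × Int)) : List (String × String) :=
  let groups := dayip_size_dictionary.foldl
    (fun (g : PySem.Dict String (List (String × Int))) rec =>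
      let parts := ((PySem.Str.split? rec.1 " - ").getD [])
      let date := (PySem.List.pyGet? parts 0).getD ""
      let ip := (PySem.List.pyGet? parts 1).getD ""
      g.insert date (g.getD date [] ++ [(ip, rec.2)]))
    PySem.Dict.empty
  groups.items.map (fun p => (p.1, ((PySem.List.max? p.2 (fun t => t.2)).map (fun t => t.1)).getD ""))

-- ===== PRECONDITION & SPEC =====
-- Pre_ excludes (a) keys without the separator " - ", on which A raises IndexError, and
-- (b) association lists with duplicate keys, which do not represent a Python dict
-- (A's lookup dayip_size_dictionary[rec] is by key, so the list must be a genuine dict).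
def Pre_get_max_downloader_per_day (dayip_size_dictionary : List (String × Int)) : Prop :=
  (dayip_size_dictionary.map (fun p => p.1)).Nodup ∧
  ∀ p ∈ dayip_size_dictionary, 2 ≤ (((PySem.Str.split? p.1 " - ").getD [])).length
instance (dayip_size_dictionary : List (String × Int)) : Decidable (Pre_get_max_downloader_per_day dayip_size_dictionary) := by unfold Pre_get_max_downloader_per_day; infer_instance
def pvWitness_get_max_downloader_per_day : (List (String × Int)) :=
  [("2020-01-01 - 1.2.3.4", 5), ("2020-01-01 - 5.6.7.8", 3)]

def Spec_get_max_downloader_per_day (dayip_size_dictionary : List (String × Int)) (out : List (String × String)) : Prop := out = get_max_downloader_per_day_alt dayip_size_dictionary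
instance (dayip_size_dictionary : List (String × Int)) (out : List (String × String)) : Decidable (Spec_get_max_downloader_per_day dayip_size_dictionary out) := by unfold Spec_get_max_downloader_per_day; infer_instance

-- ===== CLAIM (what is proved, stated in full; the proofs are below) =====
def Claim_equal_get_max_downloader_per_day : Prop := ∀ (dayip_size_dictionary : List (String × Int)), Dom_get_max_downloader_per_day dayip_size_dictionary → Pre_get_max_downloader_per_day dayip_size_dictionary → Spec_get_max_downloader_per_day dayip_size_dictionary (get_max_downloader_per_day dayip_size_dictionary)

-- ===== LEMMAS AND PROOFS =====

-- first-maximal ip / maximal size of a group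
def pvBestIp (l : List (String × Int)) : String :=
  ((PySem.List.max? l (fun t => t.2)).map (fun t => t.1)).getD ""
def pvBestSz (l : List (String × Int)) : Int :=
  ((PySem.List.max? l (fun t => t.2)).map (fun t => t.2)).getD 0

lemma pv_contains_map {ν ν' : Type} (f : String × ν → ν') (l : List (String × ν)) (k : String) :
    (PySem.Dict.mk (l.map (fun p => (p.1, f p)))).contains k = (PySem.Dict.mk l).contains k := by
  simp [PySem.Dict.contains, List.any_map, Function.comp_def]

lemma pv_max?_append_singleton (l : List (String × Int)) (x m : String × Int)
    (h : PySem.List.max? l (fun t => t.2) = some m) :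
    PySem.List.max? (l ++ [x]) (fun t => t.2)
      = if m.2 < x.2 then some x else some m := by
  unfold PySem.List.max? at h ⊢
  rw [List.foldl_append, h]
  simp [List.foldl]

lemma pv_loop (d t : List (String × Int))
    (hsz : ∀ rec ∈ t, ((PySem.Dict.mk d).get? rec.1).getD 0 = rec.2)
    (g : PySem.Dict String (List (String × Int)))
    (hnd : (g.items.map Prod.fst).Nodup)
    (hne : ∀ p ∈ g.items, p.2 ≠ []) :
    t.foldl
      (fun (st : PySem.Dict String String × PySem.Dict String Int) rec =>
        let date := (PySem.List.pyGet? ((PySem.Str.split? rec.1 " - ").getD []) 0).getD ""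
        let ip := (PySem.List.pyGet? ((PySem.Str.split? rec.1 " - ").getD []) 1).getD ""
        let size := ((PySem.Dict.mk d).get? rec.1).getD 0
        if st.2.contains date then
          if st.2.getD date 0 < size then
            (st.1.insert date ip, st.2.insert date size)
          else st
        else (st.1.insert date ip, st.2.insert date size))
      (PySem.Dict.mk (g.items.map (fun p => (p.1, pvBestIp p.2))),
       PySem.Dict.mk (g.items.map (fun p => (p.1, pvBestSz p.2))))
    = (PySem.Dict.mk ((t.foldl
        (fun (g : PySem.Dict String (List (String × Int))) rec =>
          let parts := (PySem.Str.split? rec.1 " - ").getD []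
          let date := (PySem.List.pyGet? parts 0).getD ""
          let ip := (PySem.List.pyGet? parts 1).getD ""
          g.insert date (g.getD date [] ++ [(ip, rec.2)])) g).items.map (fun p => (p.1, pvBestIp p.2))),
       PySem.Dict.mk ((t.foldl
        (fun (g : PySem.Dict String (List (String × Int))) rec =>
          let parts := (PySem.Str.split? rec.1 " - ").getD []
          let date := (PySem.List.pyGet? parts 0).getD ""
          let ip := (PySem.List.pyGet? parts 1).getD ""
          g.insert date (g.getD date [] ++ [(ip, rec.2)])) g).items.map (fun p => (p.1, pvBestSz p.2)))) := by
  induction t generalizing g with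
  | nil => rfl
  | cons rec t ih =>
    simp only [List.foldl_cons]
    rw [hsz rec (by simp)]
    set date := (PySem.List.pyGet? ((PySem.Str.split? rec.1 " - ").getD []) 0).getD "" with hdate
    set ip := (PySem.List.pyGet? ((PySem.Str.split? rec.1 " - ").getD []) 1).getD "" with hip
    rw [pv_contains_map, show PySem.Dict.mk g.items = g from rfl]
    by_cases hc : g.contains date = true
    · -- date already grouped
      obtain ⟨group, hp⟩ : ∃ gr, (date, gr) ∈ g.items := by
        obtain ⟨p, hp, hpk⟩ : ∃ p ∈ g.items, p.1 = date := by
          simpa [PySem.Dict.contains, List.any_eq_true] using hc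
        exact ⟨p.2, by rw [← hpk]; simpa using hp⟩
      have hkeysnd : g.keys.Nodup := by simpa [PySem.Dict.keys] using hnd
      have hgd : g.getD date [] = group := PySem.Dict.getD_of_mem_items g hp hkeysnd []
      have hgne : group ≠ [] := hne _ hp
      obtain ⟨m, hm⟩ : ∃ m, PySem.List.max? group (fun t => t.2) = some m := by
        cases hmx : PySem.List.max? group (fun t => t.2) with
        | none => exact absurd ((PySem.List.max?_eq_none_iff _ _).mp hmx) hgne
        | some m => exact ⟨m, rfl⟩
      have hsd : (PySem.Dict.mk (g.items.map (fun p => (p.1, pvBestSz p.2)))).getD date 0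
          = pvBestSz group := by
        apply PySem.Dict.getD_of_mem_items
        · exact List.mem_map_of_mem hp
        · simpa [PySem.Dict.keys, List.map_map, Function.comp_def] using hnd
      have hbsz : pvBestSz group = m.2 := by simp [pvBestSz, hm]
      have hcont2 : (PySem.Dict.mk (g.items.map (fun p => (p.1, pvBestSz p.2)))).contains date = true := by
        rw [pv_contains_map]; exact hc
      have hcont1 : (PySem.Dict.mk (g.items.map (fun p => (p.1, pvBestIp p.2)))).contains date = true := by
        rw [pv_contains_map]; exact hc
      rw [if_pos hc, hgd, hsd, hbsz]
      have hgi' : (g.insert date (group ++ [(ip, rec.2)])).items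
          = g.items.map (fun q => if q.1 == date then (date, group ++ [(ip, rec.2)]) else q) :=
        PySem.Dict.items_insert_of_contains g _ hc
      have hfst : (g.insert date (group ++ [(ip, rec.2)])).items.map Prod.fst
          = g.items.map Prod.fst := by
        rw [hgi']
        simp only [List.map_map]
        apply List.map_congr_left
        intro q hq
        by_cases hb : q.1 == date
        · simp [eq_of_beq hb]
        · have hqd : ¬ q.1 = date := by simpa using hb
          simp [hqd]
      have hnd' : ((g.insert date (group ++ [(ip, rec.2)])).items.map Prod.fst).Nodup := by
        rw [hfst]; exact hnd
      have hne' : ∀ p ∈ (g.insert date (group ++ [(ip, rec.2)])).items, p.2 ≠ [] := by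
        intro p hpm
        rw [hgi'] at hpm
        obtain ⟨q, hq, rfl⟩ := List.mem_map.mp hpm
        by_cases hb : q.1 == date
        · simp [hb]
        · simp [hb]; exact hne q hq
      have hsz' : ∀ r ∈ t, ((PySem.Dict.mk d).get? r.1).getD 0 = r.2 :=
        fun r hr => hsz r (List.mem_cons_of_mem _ hr)
      by_cases hlt : m.2 < rec.2
      · rw [if_pos hlt]
        have hmax := pv_max?_append_singleton group (ip, rec.2) m hm
        rw [if_pos hlt] at hmax
        have hIp : (PySem.Dict.mk (g.items.map (fun p => (p.1, pvBestIp p.2)))).insert date ip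
            = PySem.Dict.mk ((g.insert date (group ++ [(ip, rec.2)])).items.map (fun p => (p.1, pvBestIp p.2))) := by
          apply PySem.Dict.ext
          rw [PySem.Dict.items_insert_of_contains _ _ hcont1, hgi']
          simp only [List.map_map]
          apply List.map_congr_left
          intro q hq
          by_cases hb : q.1 == date
          · have hqd : q.1 = date := eq_of_beq hb
            simp [hqd, pvBestIp, hmax]
          · have hqd : ¬ q.1 = date := by simpa using hb
            simp [hqd]
        have hSz : (PySem.Dict.mk (g.items.map (fun p => (p.1, pvBestSz p.2)))).insert date rec.2
            = PySem.Dict.mk ((g.insert date (group ++ [(ip, rec.2)])).items.map (fun p => (p.1, pvBestSz p.2))) := by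
          apply PySem.Dict.ext
          rw [PySem.Dict.items_insert_of_contains _ _ hcont2, hgi']
          simp only [List.map_map]
          apply List.map_congr_left
          intro q hq
          by_cases hb : q.1 == date
          · have hqd : q.1 = date := eq_of_beq hb
            simp [hqd, pvBestSz, hmax]
          · have hqd : ¬ q.1 = date := by simpa using hb
            simp [hqd]
        rw [hIp, hSz]
        exact ih hsz' _ hnd' hne'
      · rw [if_neg hlt]
        have hmax := pv_max?_append_singleton group (ip, rec.2) m hm
        rw [if_neg hlt] at hmax
        have hIp : (PySem.Dict.mk (g.items.map (fun p => (p.1, pvBestIp p.2))))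
            = PySem.Dict.mk ((g.insert date (group ++ [(ip, rec.2)])).items.map (fun p => (p.1, pvBestIp p.2))) := by
          apply PySem.Dict.ext
          rw [hgi']
          simp only [List.map_map]
          apply List.map_congr_left
          intro q hq
          by_cases hb : q.1 == date
          · have hqe : q = (date, group) := List.inj_on_of_nodup_map hnd hq hp (by simp [eq_of_beq hb])
            have hqd : q.1 = date := eq_of_beq hb
            simp [hqe, pvBestIp, hmax, hm]
          · have hqd : ¬ q.1 = date := by simpa using hb
            simp [hqd]
        have hSz : (PySem.Dict.mk (g.items.map (fun p => (p.1, pvBestSz p.2))))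
            = PySem.Dict.mk ((g.insert date (group ++ [(ip, rec.2)])).items.map (fun p => (p.1, pvBestSz p.2))) := by
          apply PySem.Dict.ext
          rw [hgi']
          simp only [List.map_map]
          apply List.map_congr_left
          intro q hq
          by_cases hb : q.1 == date
          · have hqe : q = (date, group) := List.inj_on_of_nodup_map hnd hq hp (by simp [eq_of_beq hb])
            have hqd : q.1 = date := eq_of_beq hb
            simp [hqe, pvBestSz, hmax, hm]
          · have hqd : ¬ q.1 = date := by simpa using hb
            simp [hqd]
        conv_lhs => rw [hIp, hSz]
        exact ih hsz' _ hnd' hne'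
    · -- new date
      rw [if_neg (by simp [hc])]
      have hcF : g.contains date = false := by simpa using hc
      have hgd0 : g.getD date [] = [] := PySem.Dict.getD_of_not_contains g [] hcF
      rw [hgd0]
      have hcont1F : (PySem.Dict.mk (g.items.map (fun p => (p.1, pvBestIp p.2)))).contains date = false := by
        rw [pv_contains_map]; exact hcF
      have hcont2F : (PySem.Dict.mk (g.items.map (fun p => (p.1, pvBestSz p.2)))).contains date = false := by
        rw [pv_contains_map]; exact hcF
      have hgi' : (g.insert date ([] ++ [(ip, rec.2)])).items
          = g.items ++ [(date, [] ++ [(ip, rec.2)])] :=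
        PySem.Dict.items_insert_of_not_contains g _ hcF
      have hnotmem : date ∉ g.items.map Prod.fst := by
        intro hmem
        obtain ⟨q, hq, hq1⟩ := List.mem_map.mp hmem
        simp only [PySem.Dict.contains, List.any_eq_false] at hcF
        exact hcF q hq (by simp [hq1])
      have hnd' : ((g.insert date ([] ++ [(ip, rec.2)])).items.map Prod.fst).Nodup := by
        rw [hgi', List.map_append]
        simp only [List.map_cons, List.map_nil]
        refine List.Nodup.append hnd (List.nodup_singleton _) ?_
        intro a ha hbm
        simp only [List.mem_singleton] at hbm
        subst hbm
        exact hnotmem ha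
      have hne' : ∀ p ∈ (g.insert date ([] ++ [(ip, rec.2)])).items, p.2 ≠ [] := by
        intro p hpm
        rw [hgi'] at hpm
        rcases List.mem_append.mp hpm with h | h
        · exact hne p h
        · simp at h; subst h; simp
      have hsz' : ∀ r ∈ t, ((PySem.Dict.mk d).get? r.1).getD 0 = r.2 :=
        fun r hr => hsz r (List.mem_cons_of_mem _ hr)
      have hIp : (PySem.Dict.mk (g.items.map (fun p => (p.1, pvBestIp p.2)))).insert date ip
          = PySem.Dict.mk ((g.insert date ([] ++ [(ip, rec.2)])).items.map (fun p => (p.1, pvBestIp p.2))) := by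
        apply PySem.Dict.ext
        rw [PySem.Dict.items_insert_of_not_contains _ _ hcont1F, hgi']
        simp [pvBestIp, PySem.List.max?, List.foldl]
      have hSz : (PySem.Dict.mk (g.items.map (fun p => (p.1, pvBestSz p.2)))).insert date rec.2
          = PySem.Dict.mk ((g.insert date ([] ++ [(ip, rec.2)])).items.map (fun p => (p.1, pvBestSz p.2))) := by
        apply PySem.Dict.ext
        rw [PySem.Dict.items_insert_of_not_contains _ _ hcont2F, hgi']
        simp [pvBestSz, PySem.List.max?, List.foldl]
      rw [hIp, hSz]
      exact ih hsz' _ hnd' hne'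

-- ===== VERDICT (by name: the statement is the Claim_ definition above) =====
theorem get_max_downloader_per_day_spec : Claim_equal_get_max_downloader_per_day := by
  intro d _ hpre
  obtain ⟨hnd, -⟩ := hpre
  have hsz : ∀ rec ∈ d, ((PySem.Dict.mk d).get? rec.1).getD 0 = rec.2 := by
    intro rec hr
    have hfind : (PySem.Dict.mk d).get? rec.1 = some rec.2 :=
      PySem.Dict.get?_of_mem_items (PySem.Dict.mk d) (by simpa using hr) (by simpa [PySem.Dict.keys] using hnd)
    simp [hfind]
  have key := pv_loop d d hsz PySem.Dict.empty (by simp [PySem.Dict.empty]) (by simp [PySem.Dict.empty])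
  show get_max_downloader_per_day d = get_max_downloader_per_day_alt d
  unfold get_max_downloader_per_day get_max_downloader_per_day_alt
  exact congrArg (fun st => st.1.items) key
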